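-- pv_equiv track=rewrite | github.com/gunajii/EDI-parser-and-validator | services/parser/app/core/edi_parser.py | _extract_834_members
-- ===== SOURCE A (Python) =====
-- from typing import Any, Dict, List
--
-- def _extract_834_members(segments: List[List[str]]) -> List[Dict[str, Any]]:
--     members: List[Dict[str, Any]] = []
--     current: Dict[str, Any] | None = None
--
--     for segment in segments:
--         segment_id = segment[0]
--
--         if segment_id == "INS":
--             if current:
--                 members.append(current)
--             current = {
--                 "member_id": "",
--                 "name": "",
--                 "status": segment[1] if len(segment) > 1 else "",
--                 "plan": "",
--             }
--             continue
--
--         if not current: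
--             continue
--
--         if segment_id == "REF" and len(segment) > 2 and segment[1] == "0F":
--             current["member_id"] = segment[2]
--
--         if segment_id == "NM1" and len(segment) > 4 and segment[1] == "IL":
--             current["name"] = " ".join(part for part in [segment[3], segment[4]] if part)
--
--         if segment_id == "HD" and len(segment) > 3:
--             current["plan"] = segment[3]
--
--     if current:
--         members.append(current)
--
--     return members
-- ===== SOURCE B (Python) =====
-- from typing import Any, Dict, List
--
--
-- def _block_record(ins: List[str], body: List[List[str]]) -> Dict[str, Any]:
--     record: Dict[str, Any] = {
--         "member_id": "",
--         "name": "",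
--         "status": ins[1] if len(ins) > 1 else "",
--         "plan": "",
--     }
--     for seg in body:
--         sid = seg[0]
--         if sid == "REF" and len(seg) > 2 and seg[1] == "0F":
--             record["member_id"] = seg[2]
--         if sid == "NM1" and len(seg) > 4 and seg[1] == "IL":
--             record["name"] = " ".join(part for part in [seg[3], seg[4]] if part)
--         if sid == "HD" and len(seg) > 3:
--             record["plan"] = seg[3]
--     return record
--
--
-- def _extract_834_members(segments: List[List[str]]) -> List[Dict[str, Any]]:
--     # Pass 1: split the segment stream into blocks, one per INS segment
--     # (segments before the first INS are ignored).
--     blocks: List[List[List[str]]] = []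
--     for seg in segments:
--         if seg[0] == "INS":
--             blocks.append([seg])
--         elif blocks:
--             blocks[-1].append(seg)
--     # Pass 2: one record per block.
--     return [_block_record(b[0], b[1:]) for b in blocks]
-- ===== Notes on version B (the rewrite author's own statement) =====
-- stated objective: alternative
-- what changed: Replaced the single stateful loop over (members, current, with a final flush) by a two-phase decomposition: first split the stream into INS-delimited blocks, then map each block to its record.
import Mathlib
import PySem

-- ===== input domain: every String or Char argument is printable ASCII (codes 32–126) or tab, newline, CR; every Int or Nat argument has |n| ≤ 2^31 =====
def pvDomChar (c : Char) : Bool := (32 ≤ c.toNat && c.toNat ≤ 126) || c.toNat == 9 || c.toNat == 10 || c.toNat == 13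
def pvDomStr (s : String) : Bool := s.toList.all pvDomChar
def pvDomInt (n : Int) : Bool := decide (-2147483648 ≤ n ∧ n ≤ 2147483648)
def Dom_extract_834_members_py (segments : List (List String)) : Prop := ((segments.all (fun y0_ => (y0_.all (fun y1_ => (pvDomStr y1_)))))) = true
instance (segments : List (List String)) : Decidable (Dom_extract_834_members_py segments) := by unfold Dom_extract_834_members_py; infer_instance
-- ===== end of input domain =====

-- B replaces A's single stateful loop (members, current, final flush) by a two-phase
-- decomposition: split the stream into INS-delimited blocks, then map each block to a record.


-- ===== PORT A =====
-- current = {"member_id": "", "name": "", "status": …, "plan": ""}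
def pvNewRec (seg : List String) : PySem.Dict String String :=
  PySem.Dict.ofList
    [("member_id", ""), ("name", ""),
     ("status", if seg.length > 1 then seg.getD 1 "" else ""), ("plan", "")]

-- " ".join(part for part in [x, y] if part)
def pvJoinName (x y : String) : String :=
  PySem.Str.join " " (([x, y]).filter (fun part => part ≠ ""))

-- one iteration of A's loop; state = (members, current).  seg.getD 0 "" stands for
-- segment[0]; Pre_ excludes the empty segments on which Python raises IndexError.
def pvStepA (st : List (PySem.Dict String String) × Option (PySem.Dict String String))
    (seg : List String) :
    List (PySem.Dict String String) × Option (PySem.Dict String String) :=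
  let sid := seg.getD 0 ""
  if sid = "INS" then
    let members := match st.2 with
      | some c => if c.items = [] then st.1 else st.1 ++ [c]   -- `if current:`
      | none => st.1
    (members, some (pvNewRec seg))
  else
    match st.2 with
    | none => st                                               -- `if not current: continue`
    | some c =>
      if c.items = [] then st
      else
        let c := if sid = "REF" ∧ seg.length > 2 ∧ seg.getD 1 "" = "0F"
                 then c.insert "member_id" (seg.getD 2 "") else c
        let c := if sid = "NM1" ∧ seg.length > 4 ∧ seg.getD 1 "" = "IL"
                 then c.insert "name" (pvJoinName (seg.getD 3 "") (seg.getD 4 "")) else c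
        let c := if sid = "HD" ∧ seg.length > 3
                 then c.insert "plan" (seg.getD 3 "") else c
        (st.1, some c)

def extract_834_members_py (segments : List (List String)) : List (List (String × String)) :=
  let st := segments.foldl pvStepA ([], none)
  let members := match st.2 with
    | some c => if c.items = [] then st.1 else st.1 ++ [c]     -- final `if current:`
    | none => st.1
  members.map (fun d => d.items)

-- ===== PORT B =====
-- body of _block_record's loop
def pvApplyB (record : PySem.Dict String String) (seg : List String) :
    PySem.Dict String String :=
  let sid := seg.getD 0 ""
  let record := if sid = "REF" ∧ seg.length > 2 ∧ seg.getD 1 "" = "0F"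
                then record.insert "member_id" (seg.getD 2 "") else record
  let record := if sid = "NM1" ∧ seg.length > 4 ∧ seg.getD 1 "" = "IL"
                then record.insert "name" (pvJoinName (seg.getD 3 "") (seg.getD 4 "")) else record
  if sid = "HD" ∧ seg.length > 3 then record.insert "plan" (seg.getD 3 "") else record

def pvBlockRecord (ins : List String) (body : List (List String)) : PySem.Dict String String :=
  body.foldl pvApplyB
    (PySem.Dict.ofList
      [("member_id", ""), ("name", ""),
       ("status", if ins.length > 1 then ins.getD 1 "" else ""), ("plan", "")])

-- blocks[-1].append(seg)
def pvPushLast (blocks : List (List (List String))) (seg : List String) :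
    List (List (List String)) :=
  match blocks with
  | [] => []
  | [b] => [b ++ [seg]]
  | b :: bs => b :: pvPushLast bs seg

-- pass 1 step: start a new block at INS, else append to the last block (if any)
def pvStepB (blocks : List (List (List String))) (seg : List String) :
    List (List (List String)) :=
  if seg.getD 0 "" = "INS" then blocks ++ [[seg]] else pvPushLast blocks seg

def extract_834_members_py_alt (segments : List (List String)) :
    List (List (String × String)) :=
  let blocks := segments.foldl pvStepB []
  blocks.map (fun b =>
    (match b with
     | [] => PySem.Dict.empty       -- unreachable: every block starts with its INS segment
     | ins :: body => pvBlockRecord ins body).items)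

-- ===== PRECONDITION & SPEC =====
-- Pre_ excludes inputs containing an empty segment: there `segment[0]` raises IndexError in A.
def Pre_extract_834_members_py (segments : List (List String)) : Prop :=
  ∀ s ∈ segments, s ≠ []
instance (segments : List (List String)) : Decidable (Pre_extract_834_members_py segments) := by
  unfold Pre_extract_834_members_py; infer_instance

def pvWitness_extract_834_members_py : List (List String) :=
  [["DTP", "356"], ["INS", "Y"], ["REF", "0F", "12345"],
   ["NM1", "IL", "1", "DOE", "JOHN"], ["HD", "", "", "HLT"], ["INS", "N"]]

def Spec_extract_834_members_py (segments : List (List String)) (out : List (List (String × String))) : Prop := out = extract_834_members_py_alt segments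
instance (segments : List (List String)) (out : List (List (String × String))) : Decidable (Spec_extract_834_members_py segments out) := by unfold Spec_extract_834_members_py; infer_instance

-- ===== CLAIM (what is proved, stated in full; the proofs are below) =====
def Claim_equal_extract_834_members_py : Prop := ∀ (segments : List (List String)), Dom_extract_834_members_py segments → Pre_extract_834_members_py segments → Spec_extract_834_members_py segments (extract_834_members_py segments)

-- ===== LEMMAS AND PROOFS =====

def pvRecOf (b : List (List String)) : PySem.Dict String String :=
  match b with
  | [] => PySem.Dict.empty
  | ins :: body => pvBlockRecord ins body

-- coupling invariant between A's loop state and B's block list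
def pvRel (st : List (PySem.Dict String String) × Option (PySem.Dict String String))
    (blocks : List (List (List String))) : Prop :=
  (blocks = [] ∧ st = ([], none)) ∨
  (∃ bs ins body, blocks = bs ++ [ins :: body] ∧
    st = (bs.map pvRecOf, some (pvBlockRecord ins body)))

lemma pvInsert_items_ne_nil (d : PySem.Dict String String) (k v : String) :
    (d.insert k v).items ≠ [] := by
  rcases d with ⟨items⟩
  cases items with
  | nil => simp [PySem.Dict.insert]
  | cons p rest => rw [PySem.Dict.items_insert]; split <;> simp

lemma pvInit_items (st : String) :
    (PySem.Dict.ofList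
      [("member_id", ""), ("name", ""), ("status", st), ("plan", "")]).items
    = [("member_id", ""), ("name", ""), ("status", st), ("plan", "")] := rfl

lemma pvApplyB_items_ne_nil (c : PySem.Dict String String) (seg : List String)
    (h : c.items ≠ []) : (pvApplyB c seg).items ≠ [] := by
  simp only [pvApplyB]
  split_ifs <;> first | exact pvInsert_items_ne_nil _ _ _ | exact h

lemma pvBlockRecord_items_ne_nil (ins : List String) (body : List (List String)) :
    (pvBlockRecord ins body).items ≠ [] := by
  have step : ∀ (l : List (List String)) (d : PySem.Dict String String),
      d.items ≠ [] → (l.foldl pvApplyB d).items ≠ [] := by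
    intro l
    induction l with
    | nil => intro d h; exact h
    | cons s rest ih => intro d h; exact ih _ (pvApplyB_items_ne_nil _ _ h)
  unfold pvBlockRecord
  exact step body _ (by rw [pvInit_items]; simp)

lemma pvPushLast_append (bs : List (List (List String))) (b : List (List String))
    (seg : List String) : pvPushLast (bs ++ [b]) seg = bs ++ [b ++ [seg]] := by
  induction bs with
  | nil => rfl
  | cons x xs ih =>
    cases xs with
    | nil => simp [pvPushLast]
    | cons y ys => simp [pvPushLast] at ih ⊢; exact ih

lemma pvBlockRecord_append (ins : List String) (body : List (List String))
    (seg : List String) :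
    pvBlockRecord ins (body ++ [seg]) = pvApplyB (pvBlockRecord ins body) seg := by
  simp [pvBlockRecord]

lemma pvStepA_INS (ms : List (PySem.Dict String String))
    (c : PySem.Dict String String) (seg : List String)
    (hins : seg.getD 0 "" = "INS") (hc : ¬ c.items = []) :
    pvStepA (ms, some c) seg = (ms ++ [c], some (pvNewRec seg)) := by
  simp only [pvStepA, if_pos hins, if_neg hc]

lemma pvStepA_nonINS (ms : List (PySem.Dict String String))
    (c : PySem.Dict String String) (seg : List String)
    (hins : ¬ seg.getD 0 "" = "INS") (hc : ¬ c.items = []) :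
    pvStepA (ms, some c) seg = (ms, some (pvApplyB c seg)) := by
  simp only [pvStepA, pvApplyB, if_neg hins, if_neg hc]

lemma pvRel_step (st : List (PySem.Dict String String) × Option (PySem.Dict String String))
    (blocks : List (List (List String))) (seg : List String)
    (h : pvRel st blocks) : pvRel (pvStepA st seg) (pvStepB blocks seg) := by
  by_cases hins : seg.getD 0 "" = "INS"
  · rcases h with ⟨hb, hst⟩ | ⟨bs, ins, body, hb, hst⟩
    · subst hb; subst hst
      refine Or.inr ⟨[], seg, [], ?_, ?_⟩
      · simp only [pvStepB, if_pos hins]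
      · simp only [pvStepA, if_pos hins]; rfl
    · subst hb; subst hst
      refine Or.inr ⟨bs ++ [ins :: body], seg, [], ?_, ?_⟩
      · simp only [pvStepB, if_pos hins]
      · rw [pvStepA_INS _ _ _ hins (pvBlockRecord_items_ne_nil ins body)]
        simp [pvRecOf, pvNewRec, pvBlockRecord]
  · rcases h with ⟨hb, hst⟩ | ⟨bs, ins, body, hb, hst⟩
    · subst hb; subst hst
      refine Or.inl ⟨?_, ?_⟩
      · simp only [pvStepB, if_neg hins]; rfl
      · simp only [pvStepA, if_neg hins]
    · subst hb; subst hst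
      refine Or.inr ⟨bs, ins, body ++ [seg], ?_, ?_⟩
      · simp only [pvStepB, if_neg hins]; rw [pvPushLast_append]; simp
      · rw [pvStepA_nonINS _ _ _ hins (pvBlockRecord_items_ne_nil ins body),
          pvBlockRecord_append]

lemma pvRel_foldl (segs : List (List String))
    (st : List (PySem.Dict String String) × Option (PySem.Dict String String))
    (blocks : List (List (List String))) (h : pvRel st blocks) :
    pvRel (segs.foldl pvStepA st) (segs.foldl pvStepB blocks) := by
  induction segs generalizing st blocks with
  | nil => exact h
  | cons s rest ih => exact ih (pvStepA st s) (pvStepB blocks s) (pvRel_step _ _ _ h)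


-- ===== VERDICT (by name: the statement is the Claim_ definition above) =====
theorem extract_834_members_py_spec : Claim_equal_extract_834_members_py := by
  intro segments _ _
  unfold Spec_extract_834_members_py extract_834_members_py extract_834_members_py_alt
  have h := pvRel_foldl segments ([], none) [] (Or.inl ⟨rfl, rfl⟩)
  rcases h with ⟨hb, hst⟩ | ⟨bs, ins, body, hb, hst⟩
  · rw [hb, hst]; rfl
  · rw [hb, hst]
    simp only []
    rw [if_neg (pvBlockRecord_items_ne_nil ins body)]
    simp [pvRecOf]
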